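-- pv_equiv track=rewrite | github.com/Z3R0GT/CrepVers-Engine | main_en.py | check_count
-- ===== SOURCE A (Python) =====
-- def get_count(base:list[str], names:list[str]) -> bool:
--     """Checks whether a name series with a given base exists or not
--
--     Args:
--         base (list[str]): base list
--         names (list[str]): names to verify
--
--     Returns:
--         bool: representation of existence
--     """
--     a:list[bool] = []
--     for i in names:
--         if base.count(i) != 0:
--             a.append(False)
--         else:
--             a.append(True)
--
--     return True if a.count(False) != 0 else False
--
-- def check_count(base:list[str], names:list[str]) -> bool:
--     """Check if the base sequence still exists
--     Args:
--         base (list[str]): base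
--         names (list[str]): names in sequence
--     Returns:
--         bool: representation of existence
--     """
--     base = base.copy()
--     names = names.copy()
--     try:
--         while get_count(base, names):
--             for i in names:
--                 del base[base.index(i)]
--         return True
--     except ValueError:
--         return False
-- ===== SOURCE B (Python) =====
-- def check_count(base, names):
--     if not names:
--         return True
--     q = base.count(names[0]) // names.count(names[0])
--     return all(base.count(x) == q * names.count(x) for x in names)
-- ===== Notes on version B (the rewrite author's own statement) =====
-- stated objective: faster
-- what changed: A repeatedly scans base and deletes one occurrence of every name per pass until none is left (or a deletion fails); B does no deletion at all: it computes one quotient q = count(base, names[0]) // count(names, names[0]) and checks in a single pass that every name's count in base equals q times its count in names.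
import Mathlib
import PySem

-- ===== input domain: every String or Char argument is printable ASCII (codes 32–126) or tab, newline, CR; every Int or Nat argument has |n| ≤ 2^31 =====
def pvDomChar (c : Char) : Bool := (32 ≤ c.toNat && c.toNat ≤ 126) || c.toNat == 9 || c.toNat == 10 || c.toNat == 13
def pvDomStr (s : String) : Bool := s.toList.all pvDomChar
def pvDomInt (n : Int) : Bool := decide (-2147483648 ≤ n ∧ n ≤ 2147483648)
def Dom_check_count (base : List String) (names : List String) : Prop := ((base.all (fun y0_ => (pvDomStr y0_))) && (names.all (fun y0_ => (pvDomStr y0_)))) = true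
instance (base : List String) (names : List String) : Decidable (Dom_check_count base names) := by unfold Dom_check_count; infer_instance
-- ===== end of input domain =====

-- B replaces A's repeated delete-one-copy-of-each-name passes over `base` by a single
-- divisibility check on occurrence counts (objective: simpler/faster single pass over names).
-- A mutates only its local copies (`base.copy()`), so callers observe no side effects.

-- ===== PORT A =====
-- literal port of get_count: builds the list `a` of bools, then tests a.count(False) != 0
def get_count (base : List String) (names : List String) : Bool :=
  let a : List Bool :=
    names.foldl (fun acc i =>
      if PySem.List.count base i ≠ 0 then acc ++ [false] else acc ++ [true]) []
  if PySem.List.count a false ≠ 0 then true else false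

-- the body of A's inner `for i in names: del base[base.index(i)]`; a missing name is
-- Python's ValueError, modelled as none (it aborts the for loop, as the exception does)
def delNames (base : List String) (names : List String) : Option (List String) :=
  match names with
  | [] => some base
  | i :: rest =>
    match PySem.List.remove? base i with   -- del base[base.index(i)]
    | none => none
    | some b => delNames b rest

-- termination of A's while loop: a successful pass removes one element per name
theorem delNames_length (names : List String) : ∀ (base b' : List String),
    delNames base names = some b' → b'.length + names.length = base.length := by
  induction names with
  | nil => intro base b' h; simp [delNames] at h; simp [h]
  | cons i rest ih =>
    intro base b' h
    rw [delNames] at h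
    cases hr : PySem.List.remove? base i with
    | none => rw [hr] at h; simp at h
    | some b =>
      rw [hr] at h
      change delNames b rest = some b' at h
      have hmem : i ∈ base := by
        by_contra hn
        rw [(PySem.List.remove?_eq_none_iff base i).mpr hn] at hr; cases hr
      have hb : b = base.erase i := by
        rw [PySem.List.remove?_eq_some_erase base i hmem] at hr
        exact (Option.some.inj hr).symm
      have hlen : b.length = base.length - 1 := by
        rw [hb]; exact List.length_erase_of_mem hmem
      have hpos := List.length_pos_of_mem hmem
      have := ih b b' h
      simp only [List.length_cons] at *
      omega

theorem get_count_nil (base : List String) : get_count base [] = false := by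
  simp [get_count]

-- A's while loop
def ccLoop (base : List String) (names : List String) : Bool :=
  if hg : get_count base names = true then
    match h : delNames base names with
    | none => false                       -- ValueError: return False
    | some b' => ccLoop b' names
  else true
termination_by base.length
decreasing_by
  have hlen := delNames_length names base b' h
  have hne : names ≠ [] := by
    intro hnil
    rw [hnil, get_count_nil] at hg
    cases hg
  cases names with
  | nil => exact absurd rfl hne
  | cons x xs => simp only [List.length_cons] at hlen; omega

def check_count (base : List String) (names : List String) : Bool :=
  ccLoop base names

-- ===== PORT B =====
def check_count_alt (base : List String) (names : List String) : Bool :=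
  match names with
  | [] => true
  | f :: _ =>
    let q : Int := PySem.Int.floordiv ((PySem.List.count base f : Nat) : Int)
                                      ((PySem.List.count names f : Nat) : Int)
    names.all (fun x =>
      ((PySem.List.count base x : Nat) : Int) == q * ((PySem.List.count names x : Nat) : Int))

-- ===== PRECONDITION & SPEC =====
def Spec_check_count (base : List String) (names : List String) (out : Bool) : Prop := out = check_count_alt base names
instance (base : List String) (names : List String) (out : Bool) : Decidable (Spec_check_count base names out) := by unfold Spec_check_count; infer_instance

-- ===== CLAIM (what is proved, stated in full; the proofs are below) =====
def Claim_equal_check_count : Prop := ∀ (base : List String) (names : List String), Dom_check_count base names → Spec_check_count base names (check_count base names)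

-- ===== LEMMAS AND PROOFS =====

-- the common value: base's multiset restricted to names is an integer multiple of names'
def IsMul (base : List String) (names : List String) : Prop :=
  ∃ n : Nat, ∀ x ∈ names, base.count x = n * names.count x

theorem get_count_iff (base names : List String) :
    get_count base names = true ↔ ∃ x ∈ names, base.count x ≠ 0 := by
  have aux : ∀ (ns : List String) (acc : List Bool),
      false ∈ ns.foldl (fun acc i =>
          if PySem.List.count base i ≠ 0 then acc ++ [false] else acc ++ [true]) acc
      ↔ false ∈ acc ∨ ∃ x ∈ ns, base.count x ≠ 0 := by
    intro ns
    induction ns with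
    | nil => intro acc; simp
    | cons i rest ih =>
      intro acc
      rw [List.foldl_cons]
      by_cases hc : base.count i = 0
      · rw [if_neg (by simp [PySem.List.count_eq, hc]), ih]
        simp [hc]
      · rw [if_pos (by simp [PySem.List.count_eq, hc]), ih]
        simp
        tauto
  have hA := aux names []
  simp only [List.not_mem_nil, false_or] at hA
  simp only [get_count]
  split_ifs with h
  · simp only [true_iff]
    rw [PySem.List.count_eq] at h
    exact hA.mp (List.count_pos_iff.mp (by omega))
  · simp only [false_iff]
    intro hex
    apply h
    rw [PySem.List.count_eq]
    have := List.count_pos_iff.mpr (hA.mpr hex)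
    omega

theorem delNames_some_iff (names : List String) : ∀ base : List String,
    (delNames base names).isSome = true ↔ ∀ x, names.count x ≤ base.count x := by
  induction names with
  | nil => intro base; simp [delNames]
  | cons i rest ih =>
    intro base
    rw [delNames]
    cases hr : PySem.List.remove? base i with
    | none =>
      have hni : i ∉ base := (PySem.List.remove?_eq_none_iff base i).mp hr
      simp only [Option.isSome_none, Bool.false_eq_true, false_iff]
      intro hall
      have h1 := hall i
      have h2 : base.count i = 0 := List.count_eq_zero.mpr hni
      simp [List.count_cons_self] at h1
      omega
    | some b =>
      have hmem : i ∈ base := by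
        by_contra hn
        rw [(PySem.List.remove?_eq_none_iff base i).mpr hn] at hr; cases hr
      have hb : b = base.erase i := by
        rw [PySem.List.remove?_eq_some_erase base i hmem] at hr
        exact (Option.some.inj hr).symm
      have hbc : ∀ x, b.count x = base.count x - (if i = x then 1 else 0) := by
        intro x; rw [hb, List.count_erase]; simp
      have hpos : 0 < base.count i := List.count_pos_iff.mpr hmem
      change (delNames b rest).isSome = true ↔ _
      rw [ih b]
      constructor
      · intro h x
        have h1 := h x
        have h2 := hbc x
        simp only [List.count_cons, beq_iff_eq]
        by_cases hx : i = x
        · rw [if_pos hx]; rw [if_pos hx] at h2; rw [hx] at hpos; omega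
        · rw [if_neg hx]; rw [if_neg hx] at h2; omega
      · intro h x
        have h1 := h x
        have h2 := hbc x
        simp only [List.count_cons, beq_iff_eq] at h1
        by_cases hx : i = x
        · rw [if_pos hx] at h1; rw [if_pos hx] at h2; rw [hx] at hpos; omega
        · rw [if_neg hx] at h1; rw [if_neg hx] at h2; omega

theorem delNames_count (names : List String) : ∀ base b' : List String,
    delNames base names = some b' → ∀ x, b'.count x + names.count x = base.count x := by
  induction names with
  | nil => intro base b' h x; simp [delNames] at h; simp [h]
  | cons i rest ih =>
    intro base b' h x
    rw [delNames] at h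
    cases hr : PySem.List.remove? base i with
    | none => rw [hr] at h; simp at h
    | some b =>
      rw [hr] at h
      change delNames b rest = some b' at h
      have hmem : i ∈ base := by
        by_contra hn
        rw [(PySem.List.remove?_eq_none_iff base i).mpr hn] at hr; cases hr
      have hb : b = base.erase i := by
        rw [PySem.List.remove?_eq_some_erase base i hmem] at hr
        exact (Option.some.inj hr).symm
      have hbc : b.count x = base.count x - (if i = x then 1 else 0) := by
        rw [hb, List.count_erase]; simp
      have hpos : 0 < base.count i := List.count_pos_iff.mpr hmem
      have h1 := ih b b' h x
      simp only [List.count_cons, beq_iff_eq]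
      by_cases hx : i = x
      · rw [if_pos hx]; rw [if_pos hx] at hbc; rw [hx] at hpos; omega
      · rw [if_neg hx]; rw [if_neg hx] at hbc; omega

theorem ccLoop_iff (names : List String) : ∀ base : List String,
    ccLoop base names = true ↔ IsMul base names := by
  have main : ∀ (N : Nat) (base : List String), base.length ≤ N →
      (ccLoop base names = true ↔ IsMul base names) := by
    intro N
    induction N using Nat.strong_induction_on with
    | _ N ihN =>
      intro base hN
      rw [ccLoop]
      split
      · rename_i hg
        obtain ⟨x0, hx0m, hx0⟩ := (get_count_iff base names).mp hg
        have hne : names ≠ [] := by rintro rfl; simp at hx0m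
        split
        · rename_i heq
          simp only [Bool.false_eq_true, false_iff]
          rintro ⟨n, hn⟩
          have hnpos : 0 < n := by
            have := hn x0 hx0m
            rcases Nat.eq_zero_or_pos n with rfl | h
            · simp at this; omega
            · exact h
          have hns : ¬ ∀ x, names.count x ≤ base.count x := by
            intro hall
            have := (delNames_some_iff names base).mpr hall
            rw [heq] at this; simp at this
          push_neg at hns
          obtain ⟨x, hx⟩ := hns
          have hxm : x ∈ names := by
            by_contra hxn
            rw [List.count_eq_zero.mpr hxn] at hx; omega
          have hle : names.count x ≤ n * names.count x :=
            Nat.le_mul_of_pos_left _ hnpos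
          have := hn x hxm
          omega
        · rename_i b' heq
          have hlt : b'.length < base.length := by
            have := delNames_length names base b' heq
            cases names with
            | nil => exact absurd rfl hne
            | cons y ys => simp only [List.length_cons] at this; omega
          rw [ihN b'.length (by omega) b' (le_refl _)]
          have hc := delNames_count names base b' heq
          constructor
          · rintro ⟨n, hn⟩
            refine ⟨n + 1, fun x hx => ?_⟩
            have := hc x
            have := hn x hx
            rw [Nat.succ_mul]
            omega
          · rintro ⟨n, hn⟩
            have hnpos : 0 < n := by
              have := hn x0 hx0m
              rcases Nat.eq_zero_or_pos n with rfl | h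
              · simp at this; omega
              · exact h
            refine ⟨n - 1, fun x hx => ?_⟩
            have h1 := hc x
            have h2 := hn x hx
            have hle : names.count x ≤ n * names.count x :=
              Nat.le_mul_of_pos_left _ hnpos
            rw [Nat.sub_one_mul]
            omega
      · rename_i hg
        rw [get_count_iff] at hg
        push_neg at hg
        simp only [true_iff]
        exact ⟨0, fun x hx => by simpa using hg x hx⟩
  intro base
  exact main base.length base (le_refl _)

theorem alt_iff (base names : List String) :
    check_count_alt base names = true ↔ IsMul base names := by
  cases names with
  | nil =>
    simp only [check_count_alt, true_iff]
    exact ⟨0, fun x hx => by simp at hx⟩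
  | cons f rest =>
    have hfm : f ∈ f :: rest := List.mem_cons_self
    have hcn : 0 < (f :: rest).count f := List.count_pos_iff.mpr hfm
    simp only [check_count_alt, PySem.List.count_eq, PySem.Int.floordiv_natCast,
      List.all_eq_true, beq_iff_eq]
    constructor
    · intro h
      refine ⟨base.count f / (f :: rest).count f, fun x hx => ?_⟩
      have := h x hx
      exact_mod_cast this
    · rintro ⟨n, hn⟩
      have hq : base.count f / (f :: rest).count f = n := by
        rw [hn f hfm, Nat.mul_div_cancel _ hcn]
      intro x hx
      rw [hq, hn x hx]
      push_cast
      ring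

-- ===== VERDICT (by name: the statement is the Claim_ definition above) =====
theorem check_count_spec : Claim_equal_check_count := by
  intro base names _
  unfold Spec_check_count check_count
  rw [Bool.eq_iff_iff, ccLoop_iff, alt_iff]
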